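-- pv_equiv track=rewrite | github.com/ynoht-XD/sgd-saude | registros/routes.py | _normalize_keys_for_xlsx
-- ===== SOURCE A (Python) =====
-- def _normalize_keys_for_xlsx(rows: list[dict]) -> list[str]:
--     """
--     Monta colunas estáveis:
--     - começa com as mais importantes (se existirem)
--     - depois adiciona o resto ordenado
--     """
--     if not rows:
--         return ["Mensagem"]
--
--     # chaves que você quase sempre quer no topo
--     preferred = [
--         "id",
--         "paciente_id", "paciente_nome", "nome", "nome_paciente",
--         "paciente_cpf", "cpf",
--         "paciente_cns", "cns", "cartao_sus",
--         "paciente_nascimento", "nascimento", "data_nascimento",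
--         "data_atendimento", "data", "data_iso", "created_at",
--         "profissional_id", "prof_id", "id_profissional",
--         "profissional_nome", "nome_profissional", "profissional",
--         "profissional_cbo", "cbo_profissional", "cbo",
--         "status", "situacao", "comparecimento",
--         "cid", "cid_principal", "cid10",
--         "cidade", "municipio", "cidade_paciente", "municipio_paciente",
--         "procedimento", "ap_procedimento",
--         "codigo_sigtap", "ap_codigo_sigtap",
--         "evolucao", "observacao", "observacoes",
--         # extras (pacientes)
--         "pac__telefone", "pac__sexo", "pac__logradouro", "pac__numero", "pac__bairro", "pac__cep",
--         # extras (agendamento)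
--         "ag__inicio", "ag__hora", "ag__profissional", "ag__profissional_id", "ag__prof_cbo",
--     ]
--
--     keys_all: set[str] = set()
--     for r in rows:
--         keys_all.update(r.keys())
--
--     out: list[str] = []
--     for k in preferred:
--         if k in keys_all and k not in out:
--             out.append(k)
--
--     # resto
--     rest = sorted([k for k in keys_all if k not in out])
--     out.extend(rest)
--     return out
-- ===== SOURCE B (Python) =====
-- # Rank-table version: a literal {key: rank} dict, the key set collected in one
-- # comprehension, and a single sorted() call with the composite key (rank, name).
--
-- _RANK = {
--     "id": 0,
--     "paciente_id": 1, "paciente_nome": 2, "nome": 3, "nome_paciente": 4,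
--     "paciente_cpf": 5, "cpf": 6,
--     "paciente_cns": 7, "cns": 8, "cartao_sus": 9,
--     "paciente_nascimento": 10, "nascimento": 11, "data_nascimento": 12,
--     "data_atendimento": 13, "data": 14, "data_iso": 15, "created_at": 16,
--     "profissional_id": 17, "prof_id": 18, "id_profissional": 19,
--     "profissional_nome": 20, "nome_profissional": 21, "profissional": 22,
--     "profissional_cbo": 23, "cbo_profissional": 24, "cbo": 25,
--     "status": 26, "situacao": 27, "comparecimento": 28,
--     "cid": 29, "cid_principal": 30, "cid10": 31,
--     "cidade": 32, "municipio": 33, "cidade_paciente": 34, "municipio_paciente": 35,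
--     "procedimento": 36, "ap_procedimento": 37,
--     "codigo_sigtap": 38, "ap_codigo_sigtap": 39,
--     "evolucao": 40, "observacao": 41, "observacoes": 42,
--     "pac__telefone": 43, "pac__sexo": 44, "pac__logradouro": 45, "pac__numero": 46,
--     "pac__bairro": 47, "pac__cep": 48,
--     "ag__inicio": 49, "ag__hora": 50, "ag__profissional": 51, "ag__profissional_id": 52,
--     "ag__prof_cbo": 53,
-- }
--
--
-- def _normalize_keys_for_xlsx(rows: list[dict]) -> list[str]:
--     """
--     Monta colunas estáveis: uma única ordenação por (rank preferido, nome),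
--     chaves fora da tabela de ranks recebem o rank sentinela 55.
--     """
--     if not rows:
--         return ["Mensagem"]
--     keys_all = {k for r in rows for k in r}
--     return sorted(keys_all, key=lambda k: (_RANK.get(k, 55), k))
-- ===== Notes on version B (the rewrite author's own statement) =====
-- stated objective: idiomatic
-- what changed: Replaces A's two-phase construction (scan the preferred list appending present keys with an O(p^2) 'k not in out' check, then sort and append the remaining keys) with a precomputed literal rank table, a one-comprehension key collection, and a single sorted() over all keys under the composite key (rank-or-sentinel, key name).
import Mathlib
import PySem

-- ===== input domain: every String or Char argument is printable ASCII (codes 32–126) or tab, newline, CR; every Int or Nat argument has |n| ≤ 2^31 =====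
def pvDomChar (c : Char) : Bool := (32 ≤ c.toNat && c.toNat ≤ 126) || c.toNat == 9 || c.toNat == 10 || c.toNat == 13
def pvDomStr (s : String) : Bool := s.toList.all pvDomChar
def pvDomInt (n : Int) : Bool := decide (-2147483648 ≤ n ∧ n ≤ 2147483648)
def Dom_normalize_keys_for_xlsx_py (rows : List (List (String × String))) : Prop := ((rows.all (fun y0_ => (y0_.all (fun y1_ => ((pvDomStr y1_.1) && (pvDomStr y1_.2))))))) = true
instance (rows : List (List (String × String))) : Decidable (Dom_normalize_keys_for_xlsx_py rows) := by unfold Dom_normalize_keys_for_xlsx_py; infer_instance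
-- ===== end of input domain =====

-- B replaces A's two-phase construction (append preferred keys in order, then append the sorted rest)
-- by a literal rank table and ONE sort of all keys under the composite key (rank-or-sentinel, name); objective: idiomatic.

-- ===== PORT A =====
-- A's 'preferred' list literal
def pvPreferred : List String := [
  "id",
  "paciente_id", "paciente_nome", "nome", "nome_paciente",
  "paciente_cpf", "cpf",
  "paciente_cns", "cns", "cartao_sus",
  "paciente_nascimento", "nascimento", "data_nascimento",
  "data_atendimento", "data", "data_iso", "created_at",
  "profissional_id", "prof_id", "id_profissional",
  "profissional_nome", "nome_profissional", "profissional",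
  "profissional_cbo", "cbo_profissional", "cbo",
  "status", "situacao", "comparecimento",
  "cid", "cid_principal", "cid10",
  "cidade", "municipio", "cidade_paciente", "municipio_paciente",
  "procedimento", "ap_procedimento",
  "codigo_sigtap", "ap_codigo_sigtap",
  "evolucao", "observacao", "observacoes",
  "pac__telefone", "pac__sexo", "pac__logradouro", "pac__numero", "pac__bairro", "pac__cep",
  "ag__inicio", "ag__hora", "ag__profissional", "ag__profissional_id", "ag__prof_cbo"]

-- A's 'keys_all = set(); for r in rows: keys_all.update(r.keys())'
def pvKeysAll (rows : List (List (String × String))) : PySem.Set String :=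
  rows.foldl (fun s r => PySem.Set.update s (r.map (·.1))) ([] : PySem.Set String)

def normalize_keys_for_xlsx_py (rows : List (List (String × String))) : List String :=
  if rows = [] then ["Mensagem"]
  else
    let keys_all := pvKeysAll rows
    let out := pvPreferred.foldl (fun out k => if k ∈ keys_all ∧ k ∉ out then out ++ [k] else out) []
    let rest := PySem.List.sorted (keys_all.filter (fun k => decide (k ∉ out))) (fun x => x) false
    out ++ rest

-- ===== PORT B =====
-- Source B's module-level '_RANK = {"id": 0, "paciente_id": 1, …}' dict literal
def pvRankTable : PySem.Dict String Int := PySem.Dict.ofList [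
  ("id", 0),
  ("paciente_id", 1), ("paciente_nome", 2), ("nome", 3), ("nome_paciente", 4),
  ("paciente_cpf", 5), ("cpf", 6),
  ("paciente_cns", 7), ("cns", 8), ("cartao_sus", 9),
  ("paciente_nascimento", 10), ("nascimento", 11), ("data_nascimento", 12),
  ("data_atendimento", 13), ("data", 14), ("data_iso", 15), ("created_at", 16),
  ("profissional_id", 17), ("prof_id", 18), ("id_profissional", 19),
  ("profissional_nome", 20), ("nome_profissional", 21), ("profissional", 22),
  ("profissional_cbo", 23), ("cbo_profissional", 24), ("cbo", 25),
  ("status", 26), ("situacao", 27), ("comparecimento", 28),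
  ("cid", 29), ("cid_principal", 30), ("cid10", 31),
  ("cidade", 32), ("municipio", 33), ("cidade_paciente", 34), ("municipio_paciente", 35),
  ("procedimento", 36), ("ap_procedimento", 37),
  ("codigo_sigtap", 38), ("ap_codigo_sigtap", 39),
  ("evolucao", 40), ("observacao", 41), ("observacoes", 42),
  ("pac__telefone", 43), ("pac__sexo", 44), ("pac__logradouro", 45), ("pac__numero", 46),
  ("pac__bairro", 47), ("pac__cep", 48),
  ("ag__inicio", 49), ("ag__hora", 50), ("ag__profissional", 51), ("ag__profissional_id", 52),
  ("ag__prof_cbo", 53)]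

-- 'keys_all = {k for r in rows for k in r}' then 'sorted(keys_all, key=lambda k: (_RANK.get(k, 55), k))'
def normalize_keys_for_xlsx_py_alt (rows : List (List (String × String))) : List String :=
  if rows = [] then ["Mensagem"]
  else
    PySem.List.sorted2 (PySem.Set.ofList (rows.flatMap (fun r => r.map (·.1))))
      (fun k => pvRankTable.getD k 55) (fun k => k) false

-- ===== PRECONDITION & SPEC =====
def Spec_normalize_keys_for_xlsx_py (rows : List (List (String × String))) (out : List String) : Prop := out = normalize_keys_for_xlsx_py_alt rows
instance (rows : List (List (String × String))) (out : List String) : Decidable (Spec_normalize_keys_for_xlsx_py rows out) := by unfold Spec_normalize_keys_for_xlsx_py; infer_instance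

-- ===== CLAIM (what is proved, stated in full; the proofs are below) =====
def Claim_equal_normalize_keys_for_xlsx_py : Prop := ∀ (rows : List (List (String × String))), Dom_normalize_keys_for_xlsx_py rows → Spec_normalize_keys_for_xlsx_py rows (normalize_keys_for_xlsx_py rows)

-- ===== LEMMAS AND PROOFS =====

def pvRankD (k : String) : Int := pvRankTable.getD k 55

def pvLexLt (a b : String) : Prop := pvRankD a < pvRankD b ∨ (pvRankD a = pvRankD b ∧ a < b)
def pvLexLe (a b : String) : Prop := pvRankD a < pvRankD b ∨ (pvRankD a = pvRankD b ∧ a ≤ b)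

def pvBefore (a b : String) : Bool :=
  decide (pvRankD a < pvRankD b) || (!decide (pvRankD b < pvRankD a) && decide (a < b))

theorem pvLexLt_le {a b : String} (h : pvLexLt a b) : pvLexLe a b := by
  rcases h with h | ⟨h1, h2⟩
  · exact Or.inl h
  · exact Or.inr ⟨h1, le_of_lt h2⟩

theorem pvLexLe_trans {a b c : String} (h : pvLexLe a b) (g : pvLexLe b c) : pvLexLe a c := by
  rcases h with h | ⟨h1, h2⟩ <;> rcases g with g | ⟨g1, g2⟩
  · exact Or.inl (h.trans g)
  · exact Or.inl (by omega)
  · exact Or.inl (by omega)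
  · exact Or.inr ⟨h1.trans g1, h2.trans g2⟩

theorem pvLexLe_antisymm {a b : String} (h : pvLexLe a b) (g : pvLexLe b a) : a = b := by
  rcases h with h | ⟨h1, h2⟩ <;> rcases g with g | ⟨g1, g2⟩
  · omega
  · omega
  · omega
  · exact le_antisymm h2 g2

theorem pvBefore_true {a b : String} (h : pvBefore a b = true) : pvLexLe a b := by
  simp only [pvBefore, Bool.or_eq_true, Bool.and_eq_true, Bool.not_eq_eq_eq_not, Bool.not_true,
    decide_eq_true_eq, decide_eq_false_iff_not] at h
  rcases h with h | ⟨h1, h2⟩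
  · exact Or.inl h
  · rcases lt_or_eq_of_le (not_lt.mp h1) with hlt | heq
    · exact Or.inl hlt
    · exact Or.inr ⟨heq, le_of_lt h2⟩

theorem pvBefore_false {a b : String} (h : pvBefore a b = false) : pvLexLe b a := by
  simp only [pvBefore, Bool.or_eq_false_iff, Bool.and_eq_false_iff, Bool.not_eq_eq_eq_not,
    Bool.not_false, decide_eq_true_eq, decide_eq_false_iff_not] at h
  obtain ⟨h1, h2⟩ := h
  rcases h2 with h2 | h2
  · exact Or.inl (by omega)
  · rcases lt_or_eq_of_le (not_lt.mp h1) with hlt | heq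
    · exact Or.inl hlt
    · exact Or.inr ⟨heq, not_lt.mp h2⟩

theorem pvInsertBy_pairwise (x : String) (ys : List String) (h : ys.Pairwise pvLexLe) :
    (PySem.List.insertBy pvBefore x ys).Pairwise pvLexLe := by
  induction ys with
  | nil => simp [PySem.List.insertBy]
  | cons y ys ih =>
    rw [List.pairwise_cons] at h
    by_cases hb : pvBefore x y = true
    · rw [show PySem.List.insertBy pvBefore x (y :: ys) = x :: y :: ys by
        simp [PySem.List.insertBy, hb]]
      rw [List.pairwise_cons]
      refine ⟨?_, List.pairwise_cons.mpr h⟩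
      intro z hz
      rcases List.mem_cons.mp hz with rfl | hz
      · exact pvBefore_true hb
      · exact pvLexLe_trans (pvBefore_true hb) (h.1 z hz)
    · rw [show PySem.List.insertBy pvBefore x (y :: ys) = y :: PySem.List.insertBy pvBefore x ys by
        simp [PySem.List.insertBy, hb]]
      rw [List.pairwise_cons]
      refine ⟨?_, ih h.2⟩
      intro z hz
      rcases (PySem.List.mem_insertBy _ _ _ _).mp hz with rfl | hz
      · exact pvBefore_false (Bool.eq_false_iff.mpr hb)
      · exact h.1 z hz

theorem pvFoldl_insertBy_pairwise (xs : List String) :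
    ∀ acc : List String, acc.Pairwise pvLexLe →
      (xs.foldl (fun acc x => PySem.List.insertBy pvBefore x acc) acc).Pairwise pvLexLe := by
  induction xs with
  | nil => intro acc h; simpa using h
  | cons x xs ih =>
    intro acc h
    simpa using ih _ (pvInsertBy_pairwise x acc h)

theorem pvSorted2_eq (xs ys : List String) (hperm : ys.Perm xs) (hpw : ys.Pairwise pvLexLt) :
    PySem.List.sorted2 xs (fun k => pvRankTable.getD k 55) (fun k => k) false = ys := by
  have h1 : PySem.List.sorted2 xs (fun k => pvRankTable.getD k 55) (fun k => k) false
      = xs.foldl (fun acc x => PySem.List.insertBy pvBefore x acc) [] := rfl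
  have h2 : (xs.foldl (fun acc x => PySem.List.insertBy pvBefore x acc) []).Pairwise pvLexLe :=
    pvFoldl_insertBy_pairwise xs [] (by simp)
  have h3 : ys.Pairwise pvLexLe := hpw.imp pvLexLt_le
  have h4 : (xs.foldl (fun acc x => PySem.List.insertBy pvBefore x acc) []).Perm xs := by
    rw [← h1]; exact PySem.List.sorted2_perm xs _ _ false
  rw [h1]
  exact List.eq_of_perm_of_sorted (fun a b _ _ hab hba => pvLexLe_antisymm hab hba)
    h2 h3 (h4.trans hperm.symm)

theorem pvOutFold (l : List String) :
    ∀ acc : List String, l.Nodup → (∀ k ∈ l, k ∉ acc) →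
      ∀ S : List String,
      l.foldl (fun out k => if k ∈ S ∧ k ∉ out then out ++ [k] else out) acc
        = acc ++ l.filter (fun k => decide (k ∈ S)) := by
  induction l with
  | nil => intro acc _ _ S; simp
  | cons k l ih =>
    intro acc hnd hacc S
    have hk : k ∉ acc := hacc k (List.mem_cons_self)
    rw [List.nodup_cons] at hnd
    simp only [List.foldl_cons, List.filter_cons]
    by_cases hS : k ∈ S
    · rw [if_pos ⟨hS, hk⟩, ih (acc ++ [k]) hnd.2 ?h S]
      · simp [hS]
      case h =>
        intro j hj
        simp only [List.mem_append, List.mem_singleton]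
        rintro (hja | rfl)
        · exact hacc j (List.mem_cons_of_mem _ hj) hja
        · exact hnd.1 hj
    · rw [if_neg (by tauto), ih acc hnd.2 (fun j hj => hacc j (List.mem_cons_of_mem _ hj)) S]
      simp [hS]

theorem pvKeysAll_mem_aux (rows : List (List (String × String))) :
    ∀ (s : PySem.Set String) (a : String),
      (a ∈ rows.foldl (fun s r => PySem.Set.update s (r.map (·.1))) s
        ↔ a ∈ s ∨ a ∈ rows.flatMap (fun r => r.map (·.1))) := by
  induction rows with
  | nil => intro s a; simp
  | cons r rows ih =>
    intro s a
    simp only [List.foldl_cons, List.flatMap_cons, List.mem_append]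
    rw [ih, PySem.Set.mem_update]
    tauto

theorem pvKeysAll_nodup_aux (rows : List (List (String × String))) :
    ∀ s : PySem.Set String, s.Nodup →
      (rows.foldl (fun s r => PySem.Set.update s (r.map (·.1))) s).Nodup := by
  induction rows with
  | nil => intro s h; simpa using h
  | cons r rows ih =>
    intro s h
    simpa using ih _ (PySem.Set.nodup_update s (r.map (·.1)) h)

theorem pvKeysAll_nodup (rows : List (List (String × String))) : (pvKeysAll rows).Nodup :=
  pvKeysAll_nodup_aux rows [] (by simp)

theorem pvKeysB_perm (rows : List (List (String × String))) :
    (PySem.Set.ofList (rows.flatMap (fun r => r.map (·.1)))).Perm (pvKeysAll rows) := by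
  rw [List.perm_ext_iff_of_nodup (PySem.Set.nodup_ofList _) (pvKeysAll_nodup rows)]
  intro a
  rw [PySem.Set.mem_ofList]
  unfold pvKeysAll
  rw [pvKeysAll_mem_aux rows [] a]
  simp

set_option maxRecDepth 100000 in
theorem pvRankKeys : pvRankTable.items.map (·.1) = pvPreferred := by decide

theorem pvRankD_notmem {k : String} (h : k ∉ pvPreferred) : pvRankD k = 55 := by
  apply PySem.Dict.getD_of_not_contains
  show (pvRankTable.items.any fun p => p.1 == k) = false
  rw [List.any_eq_false]
  intro p hp
  simp only [beq_iff_eq]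
  intro hc
  exact h (hc ▸ pvRankKeys ▸ List.mem_map_of_mem hp)

def pvCastNat (i : Nat) : Int := i

set_option maxRecDepth 100000 in
theorem pvMapRank : pvPreferred.map pvRankD = List.map pvCastNat (List.range 54) := by
  decide

theorem pvRankD_lt_of_mem {k : String} (h : k ∈ pvPreferred) : pvRankD k < 55 := by
  have hm : pvRankD k ∈ pvPreferred.map pvRankD := List.mem_map_of_mem h
  rw [pvMapRank] at hm
  obtain ⟨i, hi, hik⟩ := List.mem_map.mp hm
  rw [List.mem_range] at hi
  simp only [pvCastNat] at hik
  omega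

theorem pvPref_pairwise : pvPreferred.Pairwise (fun a b => pvRankD a < pvRankD b) := by
  have h2 : (List.map pvCastNat (List.range 54)).Pairwise (fun a b : Int => a < b) := by
    rw [List.pairwise_map]
    refine List.pairwise_lt_range.imp ?_
    intro a b hab
    simp only [pvCastNat]
    exact_mod_cast hab
  rw [← pvMapRank] at h2
  exact (List.pairwise_map).mp h2

theorem pvPreferred_nodup : pvPreferred.Nodup := by decide

theorem pvMain (xs keys : List String) (hperm : xs.Perm keys) (hnd : keys.Nodup) :
    PySem.List.sorted2 xs (fun k => pvRankTable.getD k 55) (fun k => k) false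
      = pvPreferred.filter (fun k => decide (k ∈ keys))
        ++ PySem.List.sorted
            (keys.filter (fun k => decide (k ∉ pvPreferred.filter (fun k => decide (k ∈ keys)))))
            (fun x => x) false := by
  have hPmem : ∀ a : String, a ∈ pvPreferred.filter (fun k => decide (k ∈ keys)) ↔
      a ∈ pvPreferred ∧ a ∈ keys := by intro a; simp [List.mem_filter]
  have hPnd : (pvPreferred.filter (fun k => decide (k ∈ keys))).Nodup := pvPreferred_nodup.filter _
  have hfnd : (keys.filter (fun k => decide (k ∉ pvPreferred.filter (fun k => decide (k ∈ keys))))).Nodup :=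
    hnd.filter _
  have hRperm := PySem.List.sorted_perm
    (keys.filter (fun k => decide (k ∉ pvPreferred.filter (fun k => decide (k ∈ keys)))))
    (fun x : String => x) false
  have hRnd := (hRperm.nodup_iff).mpr hfnd
  have hRmem : ∀ a : String, a ∈ PySem.List.sorted
      (keys.filter (fun k => decide (k ∉ pvPreferred.filter (fun k => decide (k ∈ keys)))))
      (fun x : String => x) false ↔
      a ∈ keys ∧ a ∉ pvPreferred.filter (fun k => decide (k ∈ keys)) := by
    intro a
    rw [PySem.List.mem_sorted, List.mem_filter]
    simp only [decide_eq_true_eq]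
  have hRnotpref : ∀ a, a ∈ PySem.List.sorted
      (keys.filter (fun k => decide (k ∉ pvPreferred.filter (fun k => decide (k ∈ keys)))))
      (fun x : String => x) false → a ∉ pvPreferred := by
    intro a ha hpref
    obtain ⟨hk, hnp⟩ := (hRmem a).mp ha
    exact hnp ((hPmem a).mpr ⟨hpref, hk⟩)
  have hRle : (PySem.List.sorted
      (keys.filter (fun k => decide (k ∉ pvPreferred.filter (fun k => decide (k ∈ keys)))))
      (fun x : String => x) false).Pairwise (fun a b => a ≤ b) :=
    PySem.List.sorted_pairwise _ _
  have hRlt : (PySem.List.sorted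
      (keys.filter (fun k => decide (k ∉ pvPreferred.filter (fun k => decide (k ∈ keys)))))
      (fun x : String => x) false).Pairwise (fun a b => a < b) :=
    (hRle.and hRnd).imp (fun h => lt_of_le_of_ne h.1 h.2)
  apply pvSorted2_eq
  · refine List.Perm.trans ?_ hperm.symm
    rw [List.perm_ext_iff_of_nodup
      (List.nodup_append.mpr ⟨hPnd, hRnd, by intro a ha b hb hab; exact ((hRmem b).mp hb).2 (hab ▸ ha)⟩) hnd]
    intro a
    rw [List.mem_append]
    constructor
    · rintro (h | h)
      · exact ((hPmem a).mp h).2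
      · exact ((hRmem a).mp h).1
    · intro ha
      by_cases hP : a ∈ pvPreferred.filter (fun k => decide (k ∈ keys))
      · exact Or.inl hP
      · exact Or.inr ((hRmem a).mpr ⟨ha, hP⟩)
  · rw [List.pairwise_append]
    refine ⟨?_, ?_, ?_⟩
    · exact (pvPref_pairwise.sublist List.filter_sublist).imp (fun h => Or.inl h)
    · refine hRlt.imp_of_mem ?_
      intro a b ha hb hab
      exact Or.inr ⟨by rw [pvRankD_notmem (hRnotpref a ha), pvRankD_notmem (hRnotpref b hb)], hab⟩
    · intro a ha b hb
      have h1 : pvRankD a < 55 := pvRankD_lt_of_mem ((hPmem a).mp ha).1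
      have h2 : pvRankD b = 55 := pvRankD_notmem (hRnotpref b hb)
      exact Or.inl (by omega)

-- ===== VERDICT (by name: the statement is the Claim_ definition above) =====
theorem normalize_keys_for_xlsx_py_spec : Claim_equal_normalize_keys_for_xlsx_py := by
  intro rows _
  unfold Spec_normalize_keys_for_xlsx_py
  by_cases h : rows = []
  · subst h; rfl
  · simp only [normalize_keys_for_xlsx_py, normalize_keys_for_xlsx_py_alt, if_neg h]
    rw [pvOutFold pvPreferred [] pvPreferred_nodup (by simp) (pvKeysAll rows)]
    simp only [List.nil_append]
    exact (pvMain _ (pvKeysAll rows) (pvKeysB_perm rows) (pvKeysAll_nodup rows)).symm
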